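-- pv_equiv track=rewrite | github.com/theSadeQ/dip-smc-pso | scripts/docs/fix_sphinx_headers.py | fix_header_jumps
-- ===== SOURCE A (Python) =====
-- from typing import List, Tuple, Dict
--
-- def find_header_jumps(content: str) -> List[Tuple[int, int, int]]:
--     """
--     Find non-consecutive header level increases (e.g., H1 → H3).
--
--     Returns:
--         List of (line_number, from_level, to_level) tuples.
--     """
--     lines = content.split('\n')
--     jumps = []
--     last_level = 0
--
--     # Skip YAML frontmatter if present
--     start_idx = 0
--     if lines and lines[0].strip() == '---':
--         try:
--             end_idx = lines[1:].index('---') + 1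
--             start_idx = end_idx + 1
--         except ValueError:
--             pass
--
--     for i, line in enumerate(lines[start_idx:], start=start_idx):
--         if line.strip().startswith('#'):
--             level = len(line) - len(line.lstrip('#'))
--
--             if last_level > 0 and level > last_level + 1:
--                 jumps.append((i, last_level, level))
--
--             last_level = level
--
--     return jumps
--
-- def fix_header_jumps(content: str) -> str:
--     """
--     Fix non-consecutive header level increases by adjusting header levels.
--
--     Strategy:
--     - When we find H1 → H3, promote H3 → H2
--     - When we find H2 → H4, promote H4 → H3
--     - And so on...
--     """
--     lines = content.split('\n')
--     jumps = find_header_jumps(content)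
--
--     if not jumps:
--         return content
--
--     # Build a map of line adjustments
--     adjustments: Dict[int, int] = {}
--
--     for line_no, from_level, to_level in jumps:
--         # Calculate how many levels to reduce
--         expected_level = from_level + 1
--         reduction = to_level - expected_level
--
--         # Mark this line for adjustment
--         adjustments[line_no] = reduction
--
--     # Apply adjustments
--     for line_no, reduction in adjustments.items():
--         line = lines[line_no]
--         if line.strip().startswith('#'):
--             # Count current level
--             current_level = len(line) - len(line.lstrip('#'))
--             new_level = current_level - reduction
--
--             # Replace the header
--             content_part = line.lstrip('#').strip()
--             lines[line_no] = '#' * new_level + ' ' + content_part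
--
--     return '\n'.join(lines)
-- ===== SOURCE B (Python) =====
-- def fix_header_jumps(content: str) -> str:
--     """Single fused pass: track last_level while walking the lines and promote
--     jump headers in place, instead of A's three passes (find jumps, build an
--     adjustments dict, apply it)."""
--     lines = content.split('\n')
--
--     # Skip YAML frontmatter if present (same rule as the finder)
--     start_idx = 0
--     if lines and lines[0].strip() == '---':
--         try:
--             start_idx = lines[1:].index('---') + 2
--         except ValueError:
--             pass
--
--     changed = False
--     last_level = 0
--     for i in range(start_idx, len(lines)):
--         line = lines[i]
--         if line.strip().startswith('#'):
--             level = len(line) - len(line.lstrip('#'))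
--             if last_level > 0 and level > last_level + 1:
--                 lines[i] = '#' * (last_level + 1) + ' ' + line.lstrip('#').strip()
--                 changed = True
--             last_level = level
--
--     if not changed:
--         return content
--     return '\n'.join(lines)
-- ===== Notes on version B (the rewrite author's own statement) =====
-- stated objective: simpler
-- what changed: A's three passes (collect jump tuples, build an adjustments dict keyed by line number, then re-scan and rewrite those lines) are fused into one pass over the lines that tracks last_level and promotes a jumping header in place.
import Mathlib
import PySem

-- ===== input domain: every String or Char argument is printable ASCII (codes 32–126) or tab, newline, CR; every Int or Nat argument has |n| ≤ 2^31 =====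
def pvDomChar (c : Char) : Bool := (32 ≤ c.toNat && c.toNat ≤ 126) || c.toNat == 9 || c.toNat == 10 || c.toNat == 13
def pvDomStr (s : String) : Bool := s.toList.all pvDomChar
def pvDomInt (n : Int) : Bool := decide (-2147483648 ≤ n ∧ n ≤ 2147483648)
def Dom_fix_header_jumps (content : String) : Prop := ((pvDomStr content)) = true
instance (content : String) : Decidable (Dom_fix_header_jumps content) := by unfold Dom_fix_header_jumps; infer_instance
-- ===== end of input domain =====

-- B fuses A's three passes (find jumps / build adjustments dict / apply) into one pass
-- tracking last_level; objective: simpler, same return value.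

-- ===== PORT A =====
-- Leaf expressions both Python versions write verbatim, on List Char:
-- line.strip().startswith('#')
def pvIsHeader (l : List Char) : Bool := PySem.Chars.startswith (PySem.Chars.strip l) ['#']
-- len(line) - len(line.lstrip('#'))   (lstrip('#') over the one-char set '#' is dropWhile (· == '#'); exact)
def pvLevel (l : List Char) : Int := (l.length : Int) - ((l.dropWhile (· == '#')).length : Int)
-- '#' * k + ' ' + line.lstrip('#').strip()   (Python's '#'*k is '' for k ≤ 0 — exactly replicate k.toNat)
def pvRewrite (k : Int) (l : List Char) : List Char :=
  List.replicate k.toNat '#' ++ [' '] ++ PySem.Chars.strip (l.dropWhile (· == '#'))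
-- frontmatter skip (identical code in A's finder and in B):
-- start_idx = 0; if lines and lines[0].strip() == '---': try: start_idx = lines[1:].index('---') + 2 except ValueError: pass
def pvStartIdx (lines : List (List Char)) : Nat :=
  match lines with
  | [] => 0
  | l0 :: rest =>
    if PySem.Chars.strip l0 = ['-', '-', '-'] then
      match PySem.List.index? rest ['-', '-', '-'] with
      | some j => j + 2
      | none => 0
    else 0

-- for i, line in enumerate(lines[start_idx:], start=start_idx): record (i, last_level, level) on a jump
def pvFindLoop : List (List Char) → Nat → Int → List (Nat × Int × Int)
  | [], _, _ => []
  | l :: rest, i, last =>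
    if pvIsHeader l then
      let lv := pvLevel l
      (if last > 0 ∧ lv > last + 1 then [(i, last, lv)] else []) ++ pvFindLoop rest (i + 1) lv
    else pvFindLoop rest (i + 1) last

def find_header_jumps (content : String) : List (Nat × Int × Int) :=
  let lines := PySem.Chars.splitOn content.toList ['\n']
  pvFindLoop (lines.drop (pvStartIdx lines)) (pvStartIdx lines) 0

-- body of A's apply loop: line = lines[line_no]; if line.strip().startswith('#'): rewrite it
-- (lines[line_no] is always in range here — the none branch is unreachable and keeps ls)
def pvApply (ls : List (List Char)) (i : Nat) (red : Int) : List (List Char) :=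
  match ls[i]? with
  | none => ls
  | some line =>
    if pvIsHeader line then ls.set i (pvRewrite (pvLevel line - red) line) else ls

def fix_header_jumps (content : String) : String :=
  let lines := PySem.Chars.splitOn content.toList ['\n']
  let jumps := find_header_jumps content
  if jumps = [] then content
  else
    let adjustments : PySem.Dict Nat Int :=
      jumps.foldl (fun d j => d.insert j.1 (j.2.2 - (j.2.1 + 1))) PySem.Dict.empty
    let lines' := adjustments.items.foldl (fun ls p => pvApply ls p.1 p.2) lines
    String.mk (PySem.Chars.join ['\n'] lines')

-- ===== PORT B =====
-- single pass over lines[start_idx:] tracking last_level; returns (rewritten suffix, changed flag)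
def pvFixLoop : List (List Char) → Int → List (List Char) × Bool
  | [], _ => ([], false)
  | l :: rest, last =>
    if pvIsHeader l then
      let lv := pvLevel l
      let r := pvFixLoop rest lv
      if last > 0 ∧ lv > last + 1 then (pvRewrite (last + 1) l :: r.1, true)
      else (l :: r.1, r.2)
    else
      let r := pvFixLoop rest last
      (l :: r.1, r.2)

def fix_header_jumps_alt (content : String) : String :=
  let lines := PySem.Chars.splitOn content.toList ['\n']
  let s := pvStartIdx lines
  let r := pvFixLoop (lines.drop s) 0
  if r.2 = false then content
  else String.mk (PySem.Chars.join ['\n'] (lines.take s ++ r.1))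

-- ===== PRECONDITION & SPEC =====
def Spec_fix_header_jumps (content : String) (out : String) : Prop := out = fix_header_jumps_alt content
instance (content : String) (out : String) : Decidable (Spec_fix_header_jumps content out) := by unfold Spec_fix_header_jumps; infer_instance

-- ===== CLAIM (what is proved, stated in full; the proofs are below) =====
def Claim_equal_fix_header_jumps : Prop := ∀ (content : String), Dom_fix_header_jumps content → Spec_fix_header_jumps content (fix_header_jumps content)

-- ===== LEMMAS AND PROOFS =====

-- the recorded jump indices are ≥ the running index
theorem pvFindLoop_ge (suf : List (List Char)) (i : Nat) (last : Int) :
    ∀ j ∈ pvFindLoop suf i last, i ≤ j.1 := by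
  induction suf generalizing i last with
  | nil => simp [pvFindLoop]
  | cons l rest ih =>
    intro j hj
    simp only [pvFindLoop] at hj
    split_ifs at hj with h1 h2
    · rcases List.mem_append.1 hj with h | h
      · rw [List.mem_singleton] at h; subst h; simp
      · have := ih (i+1) (pvLevel l) j h; omega
    · simp at hj
      have := ih (i+1) (pvLevel l) j hj; omega
    · have := ih (i+1) last j hj; omega

-- the recorded jump indices are strictly increasing, hence nodup
theorem pvFindLoop_nodup (suf : List (List Char)) (i : Nat) (last : Int) :
    ((pvFindLoop suf i last).map (·.1)).Nodup := by
  induction suf generalizing i last with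
  | nil => simp [pvFindLoop]
  | cons l rest ih =>
    simp only [pvFindLoop]
    split_ifs with h1 h2
    · rw [List.map_append]
      simp only [List.map_cons, List.map_nil]
      rw [List.singleton_append]
      refine List.nodup_cons.2 ⟨?_, ih (i+1) (pvLevel l)⟩
      intro hmem
      rcases List.mem_map.1 hmem with ⟨j, hj, hje⟩
      have := pvFindLoop_ge rest (i+1) (pvLevel l) j hj
      omega
    · simpa using ih (i+1) (pvLevel l)
    · exact ih (i+1) last

-- no jump recorded ↔ B's changed flag stays false
theorem pvFindLoop_nil_iff (suf : List (List Char)) (i : Nat) (last : Int) :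
    pvFindLoop suf i last = [] ↔ (pvFixLoop suf last).2 = false := by
  induction suf generalizing i last with
  | nil => simp [pvFindLoop, pvFixLoop]
  | cons l rest ih =>
    simp only [pvFindLoop, pvFixLoop]
    split_ifs with h1 h2
    · simp
    · simpa using ih (i+1) (pvLevel l)
    · simpa using ih (i+1) last

-- core: applying A's adjustments (in jump order) equals B's one pass over the suffix
theorem pvCore (suf : List (List Char)) (pre : List (List Char)) (last : Int) :
    (pvFindLoop suf pre.length last).foldl
        (fun ls j => pvApply ls j.1 (j.2.2 - (j.2.1 + 1))) (pre ++ suf)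
      = pre ++ (pvFixLoop suf last).1 := by
  induction suf generalizing pre last with
  | nil => simp [pvFindLoop, pvFixLoop]
  | cons l rest ih =>
    simp only [pvFindLoop, pvFixLoop]
    split_ifs with h1 h2
    · rw [List.singleton_append, List.foldl_cons]
      have harg : pvLevel l - (pvLevel l - (last + 1)) = last + 1 := by ring
      have happ : pvApply (pre ++ l :: rest) pre.length (pvLevel l - (last + 1)) =
          pre ++ pvRewrite (last + 1) l :: rest := by
        unfold pvApply
        rw [List.getElem?_append_right (le_refl pre.length)]
        simp only [Nat.sub_self, List.getElem?_cons_zero]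
        rw [if_pos h1, List.set_append_right _ _ (le_refl pre.length)]
        simp only [Nat.sub_self, List.set_cons_zero, harg]
      rw [happ]
      have hlen : pre.length + 1 = (pre ++ [pvRewrite (last + 1) l]).length := by simp
      have hsplit : pre ++ pvRewrite (last + 1) l :: rest
          = (pre ++ [pvRewrite (last + 1) l]) ++ rest := by simp
      rw [hsplit, hlen, ih]
      simp
    · have hlen : pre.length + 1 = (pre ++ [l]).length := by simp
      have hsplit : pre ++ l :: rest = (pre ++ [l]) ++ rest := by simp
      rw [List.nil_append, hsplit, hlen, ih]
      simp
    · have hlen : pre.length + 1 = (pre ++ [l]).length := by simp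
      have hsplit : pre ++ l :: rest = (pre ++ [l]) ++ rest := by simp
      rw [hsplit, hlen, ih]
      simp

theorem pvStartIdx_le (lines : List (List Char)) : pvStartIdx lines ≤ lines.length := by
  cases lines with
  | nil => simp [pvStartIdx]
  | cons l0 rest =>
    simp only [pvStartIdx]
    split_ifs with h
    · cases hidx : PySem.List.index? rest ['-', '-', '-'] with
      | none => simp
      | some j =>
        obtain ⟨hk, -, -⟩ := PySem.List.getElem_of_index?_eq_some hidx
        simp only [List.length_cons]
        omega
    · simp

-- ===== VERDICT (by name: the statement is the Claim_ definition above) =====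
theorem fix_header_jumps_spec : Claim_equal_fix_header_jumps := by
  unfold Claim_equal_fix_header_jumps
  intro content _
  unfold Spec_fix_header_jumps
  simp only [fix_header_jumps, fix_header_jumps_alt, find_header_jumps]
  set lines := PySem.Chars.splitOn content.toList ['\n'] with hlines
  set s := pvStartIdx lines with hs
  have hsle : s ≤ lines.length := pvStartIdx_le lines
  have hprelen : (lines.take s).length = s := by
    rw [List.length_take]; omega
  by_cases hnil : pvFindLoop (lines.drop s) s 0 = []
  · have hflag : (pvFixLoop (lines.drop s) 0).2 = false :=
      (pvFindLoop_nil_iff _ s 0).1 hnil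
    rw [if_pos hnil, if_pos hflag]
  · have hflag : ¬ (pvFixLoop (lines.drop s) 0).2 = false :=
      fun h => hnil ((pvFindLoop_nil_iff _ s 0).2 h)
    rw [if_neg hnil, if_neg hflag]
    have hitems := PySem.Dict.items_foldl_insert_fresh
      (pvFindLoop (lines.drop s) s 0) (fun j => j.1) (fun j => j.2.2 - (j.2.1 + 1))
      PySem.Dict.empty (fun a _ => PySem.Dict.contains_empty _)
      (pvFindLoop_nodup (lines.drop s) s 0)
    have hcore := pvCore (lines.drop s) (lines.take s) 0
    rw [hprelen, List.take_append_drop] at hcore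
    rw [hitems]
    simp only [PySem.Dict.empty, List.nil_append, List.foldl_map]
    rw [hcore]
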